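-- pv_equiv track=rewrite | github.com/cdhop/cryptanalysis | frequency_analysis.py | proximity_count
-- ===== SOURCE A (Python) =====
-- def proximity_count(text):
--     text = text.upper()
--     prox_dict = dict()
--
--     for index in range(len(text)):
--         if text[index].isalpha():
--             if text[index] not in prox_dict.keys():
--                 prox_dict[text[index]] = dict()
--
--             if index - 1 >= 0:
--                 if text[index-1].isalpha():
--                     if text[index-1] not in prox_dict[text[index]].keys():
--                         prox_dict[text[index]][text[index-1]] = 1
--                     else:
--                         prox_dict[text[index]][text[index-1]] = prox_dict[text[index]][text[index-1]] + 1
--             if index + 1 < len(text):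
--                 if text[index+1].isalpha():
--                     if text[index+1] not in prox_dict[text[index]].keys():
--                         prox_dict[text[index]][text[index+1]] = 1
--                     else:
--                         prox_dict[text[index]][text[index+1]] = prox_dict[text[index]][text[index+1]] + 1
--     return prox_dict
-- ===== SOURCE B (Python) =====
-- def proximity_count(text):
--     text = text.upper()
--     # stage 1: split into maximal runs of consecutive alphabetic characters
--     runs = []
--     cur = []
--     for c in text:
--         if c.isalpha():
--             cur.append(c)
--         else:
--             if cur:
--                 runs.append(cur)
--             cur = []
--     if cur:
--         runs.append(cur)
--     # stage 2: flat tally keyed by directed letter pairs (no nested dict here)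
--     tally = {}
--     for run in runs:
--         for a, b in zip(run, run[1:]):
--             tally[(a, b)] = tally.get((a, b), 0) + 1
--             tally[(b, a)] = tally.get((b, a), 0) + 1
--     # stage 3: assemble the nested dict from the flat tally
--     result = {c: {} for run in runs for c in run}
--     for (a, b), n in tally.items():
--         result[a][b] = n
--     return result
-- ===== Notes on version B (the rewrite author's own statement) =====
-- stated objective: alternative
-- what changed: A's single scan mutates the nested dict in place (each index conditionally creates its key and bumps its left and right neighbours' counts); B is a staged algorithm: split the text into maximal alphabetic runs, tally directed letter pairs in a flat tuple-keyed dictionary, then assemble the nested dict once from the final counts.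
import Mathlib
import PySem

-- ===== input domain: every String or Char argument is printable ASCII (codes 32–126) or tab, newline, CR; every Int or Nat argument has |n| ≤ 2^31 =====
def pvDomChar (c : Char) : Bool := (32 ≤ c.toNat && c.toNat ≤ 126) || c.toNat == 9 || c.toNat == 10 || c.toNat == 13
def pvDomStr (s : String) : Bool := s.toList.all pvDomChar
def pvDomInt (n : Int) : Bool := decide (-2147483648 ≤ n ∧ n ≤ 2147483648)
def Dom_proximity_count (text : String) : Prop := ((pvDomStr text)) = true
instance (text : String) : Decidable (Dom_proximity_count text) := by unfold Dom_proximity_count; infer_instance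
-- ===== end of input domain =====

-- B replaces A's incremental nested-dict scan (each index bumps its two neighbours in place) by a
-- staged algorithm: split into alphabetic runs, tally directed pairs in a flat tuple-keyed counter,
-- then assemble the nested dict once from the final counts (objective: alternative decomposition).

-- a 1-character Python string (text[i] is a str, and dict keys are str)
def pcKey (c : Char) : String := String.ofList [c]

abbrev PcInner := PySem.Dict String Int
abbrev PcOuter := PySem.Dict String PcInner

-- ===== PORT A =====
def proximity_count (text : String) : List (String × List (String × Int)) :=
  let l := PySem.Chars.upper text.toList          -- text = text.upper()
  let d := (PySem.List.pyRange 0 l.length 1).foldl (fun (d : PcOuter) index =>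
    match PySem.List.pyGet? l index with
    | none => d                                    -- unreachable: index in range
    | some c =>
      if PySem.Chars.isalpha c then
        let d := if d.contains (pcKey c) then d else d.insert (pcKey c) PySem.Dict.empty
        let d :=
          if index - 1 ≥ 0 then
            match PySem.List.pyGet? l (index - 1) with
            | none => d                            -- unreachable
            | some c' =>
              if PySem.Chars.isalpha c' then
                let inner := d.getD (pcKey c) PySem.Dict.empty   -- key just ensured present
                if inner.contains (pcKey c') = false then
                  d.insert (pcKey c) (inner.insert (pcKey c') 1)
                else
                  d.insert (pcKey c) (inner.insert (pcKey c') (inner.getD (pcKey c') 0 + 1))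
              else d
          else d
        if index + 1 < (l.length : Int) then
          match PySem.List.pyGet? l (index + 1) with
          | none => d                              -- unreachable
          | some c' =>
            if PySem.Chars.isalpha c' then
              let inner := d.getD (pcKey c) PySem.Dict.empty
              if inner.contains (pcKey c') = false then
                d.insert (pcKey c) (inner.insert (pcKey c') 1)
              else
                d.insert (pcKey c) (inner.insert (pcKey c') (inner.getD (pcKey c') 0 + 1))
            else d
        else d
      else d) PySem.Dict.empty
  d.items.map (fun p => (p.1, p.2.items))

-- ===== PORT B =====
def proximity_count_alt (text : String) : List (String × List (String × Int)) :=
  let l := PySem.Chars.upper text.toList          -- text = text.upper()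
  -- stage 1: split into maximal runs of consecutive alphabetic characters
  let st := l.foldl (fun (st : List (List Char) × List Char) c =>
      if PySem.Chars.isalpha c then (st.1, st.2 ++ [c])
      else if st.2 = [] then (st.1, ([] : List Char)) else (st.1 ++ [st.2], [])) (([], []) : List (List Char) × List Char)
  let runs := if st.2 = [] then st.1 else st.1 ++ [st.2]
  -- stage 2: flat tally keyed by directed letter pairs; run[1:] is PySem.List.slice run 1 none
  let tally : PySem.Dict (String × String) Int := runs.foldl (fun t r =>
      (r.zip (PySem.List.slice r (some 1) none)).foldl
        (fun (t : PySem.Dict (String × String) Int) p =>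
          let t := t.insert (pcKey p.1, pcKey p.2) (t.getD (pcKey p.1, pcKey p.2) 0 + 1)
          t.insert (pcKey p.2, pcKey p.1) (t.getD (pcKey p.2, pcKey p.1) 0 + 1)) t)
    PySem.Dict.empty
  -- stage 3: assemble the nested dict ({c: {} ...} comprehension, then one insert per tally item)
  let res0 : PcOuter := runs.foldl (fun d r =>
      r.foldl (fun (d : PcOuter) c => d.insert (pcKey c) PySem.Dict.empty) d) PySem.Dict.empty
  let res := tally.items.foldl (fun (res : PcOuter) q =>
      res.insert q.1.1 ((res.getD q.1.1 PySem.Dict.empty).insert q.1.2 q.2)) res0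
  res.items.map (fun p => (p.1, p.2.items))

-- ===== PRECONDITION & SPEC =====
def Spec_proximity_count (text : String) (out : List (String × List (String × Int))) : Prop := out = proximity_count_alt text
instance (text : String) (out : List (String × List (String × Int))) : Decidable (Spec_proximity_count text out) := by unfold Spec_proximity_count; infer_instance

-- ===== CLAIM (what is proved, stated in full; the proofs are below) =====
def Claim_equal_proximity_count : Prop := ∀ (text : String), Dom_proximity_count text → Spec_proximity_count text (proximity_count text)

-- ===== LEMMAS AND PROOFS =====

-- create (Python dict.setdefault(k, {})) and sequences of creates / bumps
def pcBump (d : PcOuter) (k k' : String) : PcOuter :=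
  d.insert k ((d.getD k PySem.Dict.empty).insert k' ((d.getD k PySem.Dict.empty).getD k' 0 + 1))
def pcCre (d : PcOuter) (k : String) : PcOuter := d.setdefault k PySem.Dict.empty
def pcCres (d : PcOuter) (ks : List String) : PcOuter := ks.foldl pcCre d
def pcBumps (d : PcOuter) (ops : List (String × String)) : PcOuter :=
  ops.foldl (fun d p => pcBump d p.1 p.2) d

-- character at index i (total form; only read at in-range indices or under self-guarding conditions)
def pcG (l : List Char) (i : Nat) : Char := l.getD i ' '

-- key created at index i (A's outer `if not in keys`), left/right bump ops at index i
def pcC (l : List Char) (i : Nat) : List String :=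
  if PySem.Chars.isalpha (pcG l i) then [pcKey (pcG l i)] else []
def pcL (l : List Char) (i : Nat) : List (String × String) :=
  if 1 ≤ i ∧ (PySem.Chars.isalpha (pcG l i) && PySem.Chars.isalpha (pcG l (i - 1))) = true then
    [(pcKey (pcG l i), pcKey (pcG l (i - 1)))] else []
def pcR (l : List Char) (i : Nat) : List (String × String) :=
  if i + 1 < l.length ∧ (PySem.Chars.isalpha (pcG l i) && PySem.Chars.isalpha (pcG l (i + 1))) = true then
    [(pcKey (pcG l i), pcKey (pcG l (i + 1)))] else []
def pcLR (l : List Char) (i : Nat) : List (String × String) := pcL l i ++ pcR l i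
def pcE (l : List Char) (i : Nat) : List (String × String) := pcR l i ++ pcL l (i + 1)
def pcCL (l : List Char) : List String :=
  l.flatMap (fun c => if PySem.Chars.isalpha c then [pcKey c] else [])

-- generic: a fold that runs an inner fold per element is the fold over the flattened op list
theorem pc_foldl_foldl {α β σ : Type} (step : σ → β → σ) (ops : α → List β)
    (is : List α) (d : σ) :
    is.foldl (fun d i => (ops i).foldl step d) d = (is.flatMap ops).foldl step d := by
  induction is generalizing d with
  | nil => rfl
  | cons i is ih => simp [List.foldl_append, ih]

theorem pc_map_getD_range {α : Type} (l : List α) (d : α) :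
    (List.range l.length).map (fun i => l.getD i d) = l := by
  apply List.ext_getElem
  · simp
  · intro i h1 h2
    simp [List.getD_eq_getElem?_getD, List.getElem?_eq_getElem h2]

-- membership facts about the op lists
theorem pcLR_key (l : List Char) (i : Nat) :
    ∀ p ∈ pcLR l i, p.1 = pcKey (pcG l i) := by
  intro p hp
  simp only [pcLR, pcL, pcR, List.mem_append] at hp
  rcases hp with h | h <;> split at h <;> simp_all

theorem pcLR_alpha (l : List Char) (i : Nat) (h : pcLR l i ≠ []) :
    PySem.Chars.isalpha (pcG l i) = true := by
  by_contra hna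
  apply h
  simp only [pcLR, pcL, pcR]
  rw [if_neg, if_neg] <;> simp_all

-- contains is preserved by bumps and creates
theorem pc_contains_bump (d : PcOuter) (k k' x : String) :
    (pcBump d k k').contains x = (x == k || d.contains x) := by
  simp [pcBump, PySem.Dict.contains_insert]

theorem pc_contains_cre (d : PcOuter) (k x : String) :
    (pcCre d k).contains x = (x == k || d.contains x) := by
  simp [pcCre, PySem.Dict.contains_setdefault]

theorem pc_contains_cres (d : PcOuter) (ks : List String) (k : String)
    (h : d.contains k = true) : (pcCres d ks).contains k = true := by
  induction ks generalizing d with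
  | nil => exact h
  | cons c ks ih =>
    simp only [pcCres, List.foldl_cons]
    exact ih _ (by simp [pc_contains_cre, h])

-- the single swap: a create commutes past a bump whose key is already present
theorem pc_cre_bump_swap (d : PcOuter) (k k' c : String) (hk : d.contains k = true) :
    pcCre (pcBump d k k') c = pcBump (pcCre d c) k k' := by
  by_cases hc : d.contains c = true
  · rw [pcCre, PySem.Dict.setdefault_of_contains _ _ (by simp [pc_contains_bump, hc]),
        pcCre, PySem.Dict.setdefault_of_contains _ _ hc]
  · rw [Bool.not_eq_true] at hc
    have hck : c ≠ k := by intro h; rw [h, hk] at hc; cases hc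
    rw [pcCre, PySem.Dict.setdefault_of_not_contains _ _ (by simp [pc_contains_bump, hc, hck]),
        pcCre, PySem.Dict.setdefault_of_not_contains _ _ hc]
    unfold pcBump
    rw [PySem.Dict.getD_insert_of_ne _ _ _ (Ne.symm hck)]
    apply PySem.Dict.ext
    rw [PySem.Dict.items_insert_of_not_contains _ _ (by simp [PySem.Dict.contains_insert, hc, hck]),
        PySem.Dict.items_insert_of_contains _ _ hk,
        PySem.Dict.items_insert_of_contains _ _ (by simp [PySem.Dict.contains_insert, hk]),
        PySem.Dict.items_insert_of_not_contains _ _ hc]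
    simp [hck]

-- a create commutes past a run of bumps on one present key
theorem pc_cre_bumps_swap (ops : List (String × String)) (d : PcOuter) (k c : String)
    (hk : d.contains k = true) (hops : ∀ p ∈ ops, p.1 = k) :
    pcCre (pcBumps d ops) c = pcBumps (pcCre d c) ops := by
  induction ops generalizing d with
  | nil => rfl
  | cons p ops ih =>
    have hp : p.1 = k := hops p (by simp)
    rw [show pcBumps d (p :: ops) = pcBumps (pcBump d p.1 p.2) ops from rfl,
        show pcBumps (pcCre d c) (p :: ops) = pcBumps (pcBump (pcCre d c) p.1 p.2) ops from rfl,
        hp]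
    rw [ih _ (by simp [pc_contains_bump, hk]) (fun q hq => hops q (by simp [hq])),
        pc_cre_bump_swap _ _ _ _ hk]

-- a run of creates commutes past a run of bumps on one present key
theorem pc_cres_bumps_swap (ks : List String) (ops : List (String × String)) (d : PcOuter)
    (k : String) (hk : d.contains k = true) (hops : ∀ p ∈ ops, p.1 = k) :
    pcCres (pcBumps d ops) ks = pcBumps (pcCres d ks) ops := by
  induction ks generalizing d with
  | nil => rfl
  | cons c ks ih =>
    simp only [pcCres, List.foldl_cons]
    rw [show pcCre (pcBumps d ops) c = pcBumps (pcCre d c) ops from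
          pc_cre_bumps_swap ops d k c hk hops]
    exact ih _ (by simp [pc_contains_cre, hk])

-- the whole remaining create phase commutes past the bumps of one index
theorem pc_crefold_bumps_swap (l : List Char) (rest : List Nat) (ops : List (String × String))
    (d : PcOuter) (k : String) (hk : d.contains k = true) (hops : ∀ p ∈ ops, p.1 = k) :
    rest.foldl (fun d j => pcCres d (pcC l j)) (pcBumps d ops)
      = pcBumps (rest.foldl (fun d j => pcCres d (pcC l j)) d) ops := by
  induction rest generalizing d with
  | nil => rfl
  | cons j rest ih =>
    simp only [List.foldl_cons]
    rw [pc_cres_bumps_swap _ _ _ k hk hops]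
    exact ih _ (pc_contains_cres _ _ _ hk)

-- interleaved create+bump fold = create phase then bump phase
theorem pc_phases (l : List Char) (is : List Nat) (d : PcOuter) :
    is.foldl (fun d i => pcBumps (pcCres d (pcC l i)) (pcLR l i)) d
      = is.foldl (fun d i => pcBumps d (pcLR l i))
          (is.foldl (fun d i => pcCres d (pcC l i)) d) := by
  induction is generalizing d with
  | nil => rfl
  | cons i is ih =>
    simp only [List.foldl_cons]
    rw [ih]
    congr 1
    by_cases hnil : pcLR l i = []
    · simp [hnil, pcBumps]
    · have ha := pcLR_alpha l i hnil
      have hC : pcC l i = [pcKey (pcG l i)] := by simp [pcC, ha]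
      rw [hC]
      exact pc_crefold_bumps_swap l is (pcLR l i) (pcCres d [pcKey (pcG l i)])
        (pcKey (pcG l i)) (by simp [pcCres, pc_contains_cre]) (pcLR_key l i)

-- Python-shape rewrites: A's `if k not in d:` block is setdefault, its counting branch is pcBump
theorem pc_cre_ite (d : PcOuter) (k : String) :
    (if d.contains k then d else d.insert k PySem.Dict.empty) = pcCre d k := by
  by_cases h : d.contains k = true
  · simp [h, pcCre, PySem.Dict.setdefault_of_contains _ _ h]
  · rw [Bool.not_eq_true] at h
    simp [h, pcCre, PySem.Dict.setdefault_of_not_contains _ _ h]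

theorem pc_bump_ite (d : PcOuter) (k k' : String) :
    (if (d.getD k PySem.Dict.empty).contains k' = false then
        d.insert k ((d.getD k PySem.Dict.empty).insert k' 1)
      else
        d.insert k ((d.getD k PySem.Dict.empty).insert k'
          ((d.getD k PySem.Dict.empty).getD k' 0 + 1))) = pcBump d k k' := by
  by_cases h : (d.getD k PySem.Dict.empty).contains k' = true
  · simp [h, pcBump]
  · rw [Bool.not_eq_true] at h
    simp [h, pcBump, PySem.Dict.getD_of_not_contains _ _ h]

theorem pc_getD_eq (l : List Char) (i : Nat) (h : i < l.length) : pcG l i = l[i] := by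
  simp [pcG, List.getD_eq_getElem?_getD, List.getElem?_eq_getElem h]

-- A's index loop is the abstract create+bump fold
theorem pc_foldA_eq (l : List Char) :
    (PySem.List.pyRange 0 l.length 1).foldl (fun (d : PcOuter) index =>
      match PySem.List.pyGet? l index with
      | none => d
      | some c =>
        if PySem.Chars.isalpha c then
          let d := if d.contains (pcKey c) then d else d.insert (pcKey c) PySem.Dict.empty
          let d :=
            if index - 1 ≥ 0 then
              match PySem.List.pyGet? l (index - 1) with
              | none => d
              | some c' =>
                if PySem.Chars.isalpha c' then
                  let inner := d.getD (pcKey c) PySem.Dict.empty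
                  if inner.contains (pcKey c') = false then
                    d.insert (pcKey c) (inner.insert (pcKey c') 1)
                  else
                    d.insert (pcKey c) (inner.insert (pcKey c') (inner.getD (pcKey c') 0 + 1))
                else d
            else d
          if index + 1 < (l.length : Int) then
            match PySem.List.pyGet? l (index + 1) with
            | none => d
            | some c' =>
              if PySem.Chars.isalpha c' then
                let inner := d.getD (pcKey c) PySem.Dict.empty
                if inner.contains (pcKey c') = false then
                  d.insert (pcKey c) (inner.insert (pcKey c') 1)
                else
                  d.insert (pcKey c) (inner.insert (pcKey c') (inner.getD (pcKey c') 0 + 1))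
              else d
          else d
        else d) PySem.Dict.empty
    = (List.range l.length).foldl (fun d i => pcBumps (pcCres d (pcC l i)) (pcLR l i))
        PySem.Dict.empty := by
  rw [PySem.List.pyRange_one]
  rw [show (((l.length : Int)) - 0).toNat = l.length by omega]
  rw [List.foldl_map]
  apply PySem.List.foldl_congr_mem
  intro d i hi
  have hi : i < l.length := List.mem_range.mp hi
  rw [show ((0 : Int) + i) = (i : Int) by omega]
  rw [PySem.List.pyGet?_natCast, List.getElem?_eq_getElem hi]
  simp only []
  by_cases ha : PySem.Chars.isalpha l[i] = true
  · rw [if_pos ha, pc_cre_ite]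
    have hC : pcCres d (pcC l i) = pcCre d (pcKey l[i]) := by
      simp [pcC, pc_getD_eq l i hi, ha, pcCres]
    rw [← hC]
    -- left neighbour
    have hleft :
        (if ((i : Int) - 1) ≥ 0 then
          match PySem.List.pyGet? l ((i : Int) - 1) with
          | none => pcCres d (pcC l i)
          | some c' =>
            if PySem.Chars.isalpha c' then
              let inner := (pcCres d (pcC l i)).getD (pcKey l[i]) PySem.Dict.empty
              if inner.contains (pcKey c') = false then
                (pcCres d (pcC l i)).insert (pcKey l[i]) (inner.insert (pcKey c') 1)
              else
                (pcCres d (pcC l i)).insert (pcKey l[i])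
                  (inner.insert (pcKey c') (inner.getD (pcKey c') 0 + 1))
            else pcCres d (pcC l i)
          else pcCres d (pcC l i))
        = pcBumps (pcCres d (pcC l i)) (pcL l i) := by
      by_cases h1 : 1 ≤ i
      · rw [if_pos (by omega)]
        rw [show ((i : Int) - 1) = ((i - 1 : Nat) : Int) by omega]
        rw [PySem.List.pyGet?_natCast, List.getElem?_eq_getElem (by omega)]
        simp only []
        by_cases hb : PySem.Chars.isalpha l[i-1] = true
        · rw [if_pos hb, pc_bump_ite]
          simp [pcL, pc_getD_eq l i hi, pc_getD_eq l (i-1) (by omega), h1, ha, hb, pcBumps]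
        · rw [if_neg hb]
          have : pcL l i = [] := by
            rw [pcL, if_neg]
            simp [pc_getD_eq l i hi, pc_getD_eq l (i-1) (by omega), h1]
            intro; simp_all
          simp [this, pcBumps]
      · rw [if_neg (by omega)]
        have : pcL l i = [] := by rw [pcL, if_neg]; intro h; omega
        simp [this, pcBumps]
    rw [hleft]
    -- right neighbour
    by_cases h2 : i + 1 < l.length
    · rw [if_pos (by exact_mod_cast Nat.cast_lt.mpr h2)]
      rw [show ((i : Int) + 1) = ((i + 1 : Nat) : Int) by omega]
      rw [PySem.List.pyGet?_natCast, List.getElem?_eq_getElem h2]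
      simp only []
      by_cases hb : PySem.Chars.isalpha l[i+1] = true
      · rw [if_pos hb, pc_bump_ite]
        have hR : pcR l i = [(pcKey l[i], pcKey l[i+1])] := by
          simp [pcR, pc_getD_eq l i hi, pc_getD_eq l (i+1) h2, h2, ha, hb]
        simp [pcLR, hR, pcBumps, List.foldl_append]
      · rw [if_neg hb]
        have hR : pcR l i = [] := by
          rw [pcR, if_neg]
          rintro ⟨-, hx⟩
          rw [pc_getD_eq l i hi, pc_getD_eq l (i+1) h2, Bool.and_eq_true] at hx
          exact hb hx.2
        simp [pcLR, hR, pcBumps]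
    · rw [if_neg (by omega)]
      have hR : pcR l i = [] := by rw [pcR, if_neg]; intro h; omega
      simp [pcLR, hR, pcBumps]
  · rw [if_neg ha]
    have hC : pcC l i = [] := by simp [pcC, pc_getD_eq l i hi, ha]
    have hL : pcL l i = [] := by
      rw [pcL, if_neg]
      rintro ⟨-, hx⟩
      rw [pc_getD_eq l i hi, Bool.and_eq_true] at hx
      exact ha hx.1
    have hR : pcR l i = [] := by
      rw [pcR, if_neg]
      rintro ⟨-, hx⟩
      rw [pc_getD_eq l i hi, Bool.and_eq_true] at hx
      exact ha hx.1
    simp [pcLR, hC, hL, hR, pcCres, pcBumps]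

-- the create lists agree: A creates per index, B per character
theorem pc_creates_eq (l : List Char) :
    (List.range l.length).flatMap (pcC l) = pcCL l := by
  have h := pc_map_getD_range l ' '
  calc (List.range l.length).flatMap (pcC l)
      = ((List.range l.length).map (fun i => l.getD i ' ')).flatMap
          (fun c => if PySem.Chars.isalpha c then [pcKey c] else []) := by
        rw [List.flatMap_map]; rfl
    _ = pcCL l := by rw [h]; rfl

-- the bump lists agree: per-node left+right ops = per-edge forward+backward ops
theorem pc_ops_aux (l : List Char) (m : Nat) :
    (List.range (m + 1)).flatMap (pcLR l) = (List.range m).flatMap (pcE l) ++ pcR l m := by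
  induction m with
  | zero =>
    have : pcL l 0 = [] := by rw [pcL, if_neg]; intro h; omega
    simp [pcLR, this]
  | succ m ih =>
    rw [List.range_succ, List.flatMap_append, ih, List.range_succ, List.flatMap_append]
    simp only [List.flatMap_cons, List.flatMap_nil, List.append_nil, pcLR, pcE]
    simp [List.append_assoc]

theorem pc_ops_eq (l : List Char) :
    (List.range l.length).flatMap (pcLR l) = (List.range (l.length - 1)).flatMap (pcE l) := by
  cases hn : l.length with
  | zero => simp
  | succ m =>
    rw [pc_ops_aux l m]
    have : pcR l m = [] := by rw [pcR, if_neg]; intro h; omega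
    simp [this]

-- ---------- B-side machinery ----------

-- the run splitter as structural recursion (rcur = current run, reversed)
def pcRunsAux (rcur : List Char) : List Char → List (List Char)
  | [] => if rcur = [] then [] else [rcur.reverse]
  | c :: rest =>
    if PySem.Chars.isalpha c then pcRunsAux (c :: rcur) rest
    else (if rcur = [] then [] else [rcur.reverse]) ++ pcRunsAux [] rest

-- adjacent pairs of a run (zip with its tail)
def pcPairs (r : List Char) : List (Char × Char) := r.zip r.tail

-- adjacent both-alphabetic pairs of the text, recursive form
def pcAdjA : List Char → List (Char × Char)
  | a :: b :: rest =>
    (if PySem.Chars.isalpha a && PySem.Chars.isalpha b then [(a, b)] else []) ++ pcAdjA (b :: rest)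
  | _ => []

-- the pair bridging the current run and the next char (if alphabetic)
def pcBridge (rcur l : List Char) : List (Char × Char) :=
  match rcur, l with
  | r :: _, c :: _ => if PySem.Chars.isalpha c then [(r, c)] else []
  | _, _ => []

-- directed events of an edge list
def pcDirP (p : Char × Char) : List (String × String) :=
  [(pcKey p.1, pcKey p.2), (pcKey p.2, pcKey p.1)]
def pcDir (ps : List (Char × Char)) : List (String × String) := ps.flatMap pcDirP

-- B's stage-1 loop step and final flush
def pcStep (st : List (List Char) × List Char) (c : Char) : List (List Char) × List Char :=
  if PySem.Chars.isalpha c then (st.1, st.2 ++ [c])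
  else if st.2 = [] then (st.1, ([] : List Char)) else (st.1 ++ [st.2], [])
def pcFlush (st : List (List Char) × List Char) : List (List Char) :=
  if st.2 = [] then st.1 else st.1 ++ [st.2]

-- B's stage-1 fold computes pcRunsAux
theorem pc_runs_fold (l : List Char) (rs : List (List Char)) (rcur : List Char) :
    pcFlush (l.foldl pcStep (rs, rcur.reverse)) = rs ++ pcRunsAux rcur l := by
  induction l generalizing rs rcur with
  | nil =>
    by_cases h : rcur = [] <;>
      simp [pcFlush, pcRunsAux, h, List.reverse_eq_nil_iff]
  | cons c rest ih =>
    rw [List.foldl_cons]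
    by_cases ha : PySem.Chars.isalpha c = true
    · rw [show pcStep (rs, rcur.reverse) c = (rs, (c :: rcur).reverse) by simp [pcStep, ha],
          ih rs (c :: rcur),
          show pcRunsAux rcur (c :: rest) = pcRunsAux (c :: rcur) rest by simp [pcRunsAux, ha]]
    · by_cases h : rcur = []
      · rw [show pcStep (rs, rcur.reverse) c = (rs, ([] : List Char).reverse) by
              simp [pcStep, ha, h],
            ih rs []]
        simp [pcRunsAux, ha, h]
      · rw [show pcStep (rs, rcur.reverse) c = (rs ++ [rcur.reverse], ([] : List Char).reverse) by
              simp [pcStep, ha, h, List.reverse_eq_nil_iff],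
            ih (rs ++ [rcur.reverse]) []]
        simp [pcRunsAux, ha, h]

-- pairs of a cons-cons
theorem pc_pairs_cons (a b : Char) (rest : List Char) :
    pcPairs (a :: b :: rest) = (a, b) :: pcPairs (b :: rest) := by
  simp [pcPairs]

-- pairs of xs ++ [c]
theorem pc_pairs_snoc (xs : List Char) (c : Char) :
    pcPairs (xs ++ [c]) = pcPairs xs ++ (match xs.getLast? with
      | some r => [(r, c)] | none => []) := by
  induction xs with
  | nil => simp [pcPairs]
  | cons x xs ih =>
    cases xs with
    | nil => simp [pcPairs]
    | cons y ys =>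
      simp only [List.cons_append] at ih ⊢
      rw [pc_pairs_cons x y (ys ++ [c]), ih]
      simp [pc_pairs_cons, List.getLast?_cons_cons]

-- flatten of the runs = the alphabetic characters
theorem pc_runs_join (l : List Char) (rcur : List Char) :
    (pcRunsAux rcur l).flatMap id = rcur.reverse ++ l.filter (fun c => PySem.Chars.isalpha c) := by
  induction l generalizing rcur with
  | nil =>
    by_cases h : rcur = [] <;> simp [pcRunsAux, h]
  | cons c rest ih =>
    by_cases ha : PySem.Chars.isalpha c = true
    · rw [show pcRunsAux rcur (c :: rest) = pcRunsAux (c :: rcur) rest by simp [pcRunsAux, ha],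
          ih (c :: rcur)]
      simp [ha]
    · rw [show pcRunsAux rcur (c :: rest)
            = (if rcur = [] then [] else [rcur.reverse]) ++ pcRunsAux [] rest by
          simp [pcRunsAux, ha]]
      rw [List.flatMap_append, ih []]
      by_cases h : rcur = [] <;> simp [h, ha]

-- pairs of the runs = the adjacent both-alphabetic pairs
theorem pc_runs_pairs (l : List Char) (rcur : List Char) :
    (pcRunsAux rcur l).flatMap pcPairs = pcPairs rcur.reverse ++ pcBridge rcur l ++ pcAdjA l := by
  induction l generalizing rcur with
  | nil =>
    by_cases h : rcur = [] <;> simp [pcRunsAux, h, pcBridge, pcAdjA, pcPairs]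
  | cons c rest ih =>
    by_cases ha : PySem.Chars.isalpha c = true
    · rw [show pcRunsAux rcur (c :: rest) = pcRunsAux (c :: rcur) rest by simp [pcRunsAux, ha],
          ih (c :: rcur)]
      have hsnoc : pcPairs ((c :: rcur).reverse)
          = pcPairs rcur.reverse ++ pcBridge rcur (c :: rest) := by
        rw [show (c :: rcur).reverse = rcur.reverse ++ [c] by simp, pc_pairs_snoc]
        congr 1
        cases rcur with
        | nil => simp [pcBridge]
        | cons r rs => simp [pcBridge, ha, List.getLast?_reverse]
      rw [hsnoc]
      have hrest : pcBridge (c :: rcur) rest ++ pcAdjA rest = pcAdjA (c :: rest) := by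
        cases rest with
        | nil => simp [pcBridge, pcAdjA]
        | cons b rest' =>
          show (if PySem.Chars.isalpha b then [(c, b)] else []) ++ pcAdjA (b :: rest')
              = (if PySem.Chars.isalpha c && PySem.Chars.isalpha b then [(c, b)] else [])
                  ++ pcAdjA (b :: rest')
          rw [ha]
          simp
      rw [List.append_assoc, hrest]
    · rw [show pcRunsAux rcur (c :: rest)
            = (if rcur = [] then [] else [rcur.reverse]) ++ pcRunsAux [] rest by
          simp [pcRunsAux, ha]]
      have h1 : (if rcur = [] then ([] : List (List Char)) else [rcur.reverse]).flatMap pcPairs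
          = pcPairs rcur.reverse := by
        by_cases h : rcur = [] <;> simp [h, pcPairs]
      have h2 : pcBridge rcur (c :: rest) = [] := by
        cases rcur <;> simp [pcBridge, ha]
      have h3 : pcAdjA (c :: rest) = pcAdjA rest := by
        cases rest with
        | nil => simp [pcAdjA]
        | cons b rest' => simp [pcAdjA, ha]
      rw [List.flatMap_append, ih [], h2, h3, h1]
      simp [pcPairs, pcBridge]

-- pcE shifts down one position
theorem pc_G_shift (a : Char) (l : List Char) (i : Nat) : pcG (a :: l) (i + 1) = pcG l i := by
  simp [pcG]

theorem pc_E_shift (a : Char) (l : List Char) (i : Nat) :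
    pcE (a :: l) (i + 1) = pcE l i := by
  have hR : pcR (a :: l) (i + 1) = pcR l i := by
    simp only [pcR, pc_G_shift, List.length_cons]
    congr 1
    exact propext ⟨fun ⟨h1, h2⟩ => ⟨by omega, h2⟩, fun ⟨h1, h2⟩ => ⟨by omega, h2⟩⟩
  have hL : pcL (a :: l) (i + 2) = pcL l (i + 1) := by
    simp only [pcL, pc_G_shift, show i + 2 - 1 = (i + 1 - 1) + 1 by omega, pc_G_shift]
    congr 1
    exact propext ⟨fun ⟨h1, h2⟩ => ⟨by omega, h2⟩, fun ⟨h1, h2⟩ => ⟨by omega, h2⟩⟩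
  simp only [pcE]
  rw [hR, show (i + 1) + 1 = i + 2 from rfl, hL]

-- the edge op list is the directed events of the adjacent alphabetic pairs
theorem pc_E_eq_dir (l : List Char) :
    (List.range (l.length - 1)).flatMap (pcE l) = pcDir (pcAdjA l) := by
  induction l with
  | nil => simp [pcDir, pcAdjA]
  | cons a l ih =>
    cases l with
    | nil => simp [pcDir, pcAdjA]
    | cons b rest =>
      have hlen : (a :: b :: rest).length - 1 = rest.length + 1 := by simp
      rw [hlen, List.range_succ_eq_map, List.flatMap_cons, List.flatMap_map]
      have hshift : ((List.range rest.length).flatMap fun i => pcE (a :: b :: rest) (i + 1))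
          = (List.range rest.length).flatMap (pcE (b :: rest)) := by
        simp only [pc_E_shift]
      have hrest : (List.range rest.length).flatMap (pcE (b :: rest)) = pcDir (pcAdjA (b :: rest)) := by
        have : (b :: rest).length - 1 = rest.length := by simp
        rw [← this]; exact ih
      have hhead : pcE (a :: b :: rest) 0
          = (if PySem.Chars.isalpha a && PySem.Chars.isalpha b then pcDirP (a, b) else []) := by
        have hg0 : pcG (a :: b :: rest) 0 = a := rfl
        have hg1 : pcG (a :: b :: rest) 1 = b := rfl
        by_cases hA : PySem.Chars.isalpha a = true <;>
          by_cases hB : PySem.Chars.isalpha b = true <;>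
            simp [pcE, pcR, pcL, hg0, hg1, hA, hB, pcDirP]
      rw [show (fun i => pcE (a :: b :: rest) (Nat.succ i)) = (fun i => pcE (a :: b :: rest) (i + 1)) from rfl]
      rw [hshift, hrest, hhead]
      by_cases hAB : (PySem.Chars.isalpha a && PySem.Chars.isalpha b) = true <;>
        simp [pcAdjA, pcDir, hAB]

-- ---------- stage 2: the tally is a flat counter ----------

def pcIns (t : PySem.Dict (String × String) Int) (e : String × String) :
    PySem.Dict (String × String) Int := t.insert e (t.getD e 0 + 1)

theorem pc_tally_eq (runs : List (List Char)) :
    runs.foldl (fun t r =>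
      (r.zip r.tail).foldl
        (fun (t : PySem.Dict (String × String) Int) p =>
          let t := t.insert (pcKey p.1, pcKey p.2) (t.getD (pcKey p.1, pcKey p.2) 0 + 1)
          t.insert (pcKey p.2, pcKey p.1) (t.getD (pcKey p.2, pcKey p.1) 0 + 1)) t)
      PySem.Dict.empty
    = PySem.Dict.counter (pcDir (runs.flatMap pcPairs)) := by
  have h0 : (fun (t : PySem.Dict (String × String) Int) (r : List Char) =>
      (r.zip r.tail).foldl
        (fun (t : PySem.Dict (String × String) Int) p =>
          let t := t.insert (pcKey p.1, pcKey p.2) (t.getD (pcKey p.1, pcKey p.2) 0 + 1)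
          t.insert (pcKey p.2, pcKey p.1) (t.getD (pcKey p.2, pcKey p.1) 0 + 1)) t)
      = (fun t r => (pcPairs r).foldl
          (fun t p => pcIns (pcIns t (pcKey p.1, pcKey p.2)) (pcKey p.2, pcKey p.1)) t) := rfl
  rw [h0, pc_foldl_foldl
        (fun t p => pcIns (pcIns t (pcKey p.1, pcKey p.2)) (pcKey p.2, pcKey p.1)) pcPairs]
  rw [PySem.List.foldl_congr_mem (runs.flatMap pcPairs)
        (fun t p => pcIns (pcIns t (pcKey p.1, pcKey p.2)) (pcKey p.2, pcKey p.1))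
        (fun t p => (pcDirP p).foldl pcIns t) _ (fun acc x _ => rfl)]
  rw [pc_foldl_foldl pcIns pcDirP]
  rw [show (runs.flatMap pcPairs).flatMap pcDirP = pcDir (runs.flatMap pcPairs) from rfl]
  rw [show pcIns = (fun (d : PySem.Dict (String × String) Int) x => d.insert x (d.getD x 0 + 1))
        from rfl]
  exact PySem.Dict.foldl_insert_getD_add_one_eq_counter _

-- ---------- stage 3a: the key comprehension is A's create phase ----------

def pcAllEmpty (d : PcOuter) : Prop := ∀ p ∈ d.items, p.2 = (PySem.Dict.empty : PcInner)

theorem pc_allEmpty_empty : pcAllEmpty PySem.Dict.empty := by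
  intro p hp
  simp [PySem.Dict.empty] at hp

theorem pc_allEmpty_insert (d : PcOuter) (k : String) (h : pcAllEmpty d) :
    pcAllEmpty (d.insert k PySem.Dict.empty) := by
  intro p hp
  rcases (PySem.Dict.mem_items_insert d k PySem.Dict.empty p).mp hp with h1 | ⟨h1, -⟩
  · rw [h1]
  · exact h p h1

theorem pc_insert_empty_eq_cre (d : PcOuter) (k : String) (h : pcAllEmpty d) :
    d.insert k PySem.Dict.empty = pcCre d k := by
  by_cases hc : d.contains k = true
  · rw [pcCre, PySem.Dict.setdefault_of_contains _ _ hc]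
    apply PySem.Dict.ext
    rw [PySem.Dict.items_insert_of_contains _ _ hc]
    have : ∀ p ∈ d.items,
        (fun (p : String × PcInner) => if p.1 == k then (k, PySem.Dict.empty) else p) p = id p := by
      intro p hp
      obtain ⟨p1, p2⟩ := p
      have hv : p2 = (PySem.Dict.empty : PcInner) := h (p1, p2) hp
      by_cases hk : p1 = k
      · simp [hk, hv]
      · simp [hk]
    rw [List.map_congr_left this, List.map_id]
  · rw [Bool.not_eq_true] at hc
    rw [pcCre, PySem.Dict.setdefault_of_not_contains _ _ hc]

theorem pc_allEmpty_cre (d : PcOuter) (k : String) (h : pcAllEmpty d) :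
    pcAllEmpty (pcCre d k) := by
  rw [← pc_insert_empty_eq_cre d k h]
  exact pc_allEmpty_insert d k h

theorem pc_allEmpty_cres (ks : List String) (d : PcOuter) (h : pcAllEmpty d) :
    pcAllEmpty (pcCres d ks) := by
  induction ks generalizing d with
  | nil => exact h
  | cons k ks ih => exact ih (pcCre d k) (pc_allEmpty_cre d k h)

theorem pc_cres_nodup (ks : List String) (d : PcOuter) (h : d.keys.Nodup) :
    (pcCres d ks).keys.Nodup := by
  induction ks generalizing d with
  | nil => exact h
  | cons k ks ih =>
    refine ih (pcCre d k) ?_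
    by_cases hc : d.contains k = true
    · rw [pcCre, PySem.Dict.setdefault_of_contains _ _ hc]; exact h
    · rw [Bool.not_eq_true] at hc
      rw [pcCre, PySem.Dict.setdefault_of_not_contains _ _ hc]
      exact PySem.Dict.nodup_keys_insert _ _ _ h

theorem pc_cres_contains_of_mem (ks : List String) (d : PcOuter) (x : String)
    (h : x ∈ ks) : (pcCres d ks).contains x = true := by
  induction ks generalizing d with
  | nil => cases h
  | cons k ks ih =>
    rcases List.mem_cons.mp h with h1 | h1
    · exact pc_contains_cres (pcCre d k) ks x (by simp [pc_contains_cre, h1])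
    · exact ih (pcCre d k) h1

theorem pc_getD_empty (d : PcOuter) (h : pcAllEmpty d) (a : String) :
    d.getD a PySem.Dict.empty = PySem.Dict.empty := by
  rw [PySem.Dict.getD_eq_get?_getD]
  cases hg : d.get? a with
  | none => rfl
  | some v =>
    simpa using h (a, v) (PySem.Dict.mem_items_of_get?_eq_some d hg)

theorem pc_CL_map (l : List Char) :
    pcCL l = (l.filter (fun c => PySem.Chars.isalpha c)).map pcKey := by
  induction l with
  | nil => rfl
  | cons c l ih =>
    by_cases ha : PySem.Chars.isalpha c = true <;> simp [pcCL, ha, ← ih]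

theorem pc_insfold_eq_cres (cs : List Char) (d : PcOuter) (h : pcAllEmpty d) :
    cs.foldl (fun (d : PcOuter) c => d.insert (pcKey c) PySem.Dict.empty) d
      = pcCres d (cs.map pcKey) := by
  induction cs generalizing d with
  | nil => rfl
  | cons c cs ih =>
    simp only [List.foldl_cons, List.map_cons, pcCres]
    rw [show pcCre d (pcKey c) = d.insert (pcKey c) PySem.Dict.empty from
          (pc_insert_empty_eq_cre d (pcKey c) h).symm]
    exact ih _ (pc_allEmpty_insert d (pcKey c) h)

theorem pc_res0_eq (l : List Char) :
    (pcRunsAux [] l).foldl (fun d r =>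
      r.foldl (fun (d : PcOuter) c => d.insert (pcKey c) PySem.Dict.empty) d) PySem.Dict.empty
    = pcCres PySem.Dict.empty (pcCL l) := by
  have h0 : (fun (d : PcOuter) (r : List Char) =>
      r.foldl (fun (d : PcOuter) c => d.insert (pcKey c) PySem.Dict.empty) d)
      = (fun d r => ((fun (r : List Char) => r) r).foldl
          (fun (d : PcOuter) c => d.insert (pcKey c) PySem.Dict.empty) d) := rfl
  rw [h0, pc_foldl_foldl (fun (d : PcOuter) c => d.insert (pcKey c) PySem.Dict.empty)
        (fun (r : List Char) => r)]
  rw [show (pcRunsAux [] l).flatMap (fun r => r) = (pcRunsAux [] l).flatMap id from rfl,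
      pc_runs_join l []]
  rw [show ([] : List Char).reverse ++ l.filter (fun c => PySem.Chars.isalpha c)
        = l.filter (fun c => PySem.Chars.isalpha c) from by simp]
  rw [pc_insfold_eq_cres _ _ pc_allEmpty_empty, pc_CL_map]

-- ---------- assembly of the flat counter = incremental bumps ----------

theorem pc_bumps_getD (E : List (String × String)) (d : PcOuter) (a : String) :
    (pcBumps d E).getD a PySem.Dict.empty
      = ((E.filter (fun e => e.1 == a)).map Prod.snd).foldl
          (fun (t : PcInner) b => t.insert b (t.getD b 0 + 1)) (d.getD a PySem.Dict.empty) := by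
  induction E generalizing d with
  | nil => rfl
  | cons e E ih =>
    rw [show pcBumps d (e :: E) = pcBumps (pcBump d e.1 e.2) E from rfl]
    by_cases he : e.1 = a
    · rw [List.filter_cons_of_pos (by simpa using he), List.map_cons, List.foldl_cons, ih]
      congr 1
      rw [pcBump, PySem.Dict.getD_insert, if_pos he.symm, he]
    · rw [List.filter_cons_of_neg (by simpa using he), ih]
      congr 1
      rw [pcBump, PySem.Dict.getD_insert, if_neg (fun hh => he hh.symm)]

theorem pc_asm_getD (L : List ((String × String) × Int)) (d : PcOuter) (a : String) :
    (L.foldl (fun (res : PcOuter) q =>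
        res.insert q.1.1 ((res.getD q.1.1 PySem.Dict.empty).insert q.1.2 q.2)) d).getD a
        PySem.Dict.empty
      = (L.filter (fun q => q.1.1 == a)).foldl
          (fun (inn : PcInner) q => inn.insert q.1.2 q.2) (d.getD a PySem.Dict.empty) := by
  induction L generalizing d with
  | nil => rfl
  | cons q L ih =>
    rw [List.foldl_cons]
    by_cases he : q.1.1 = a
    · rw [List.filter_cons_of_pos (by simpa using he), List.foldl_cons, ih]
      congr 1
      rw [PySem.Dict.getD_insert, if_pos he.symm, he]
    · rw [List.filter_cons_of_neg (by simpa using he), ih]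
      congr 1
      rw [PySem.Dict.getD_insert, if_neg (fun hh => he hh.symm)]

theorem pc_set_update_self {α : Type} [BEq α] [LawfulBEq α] (s : PySem.Set α) (xs : List α)
    (h : ∀ x ∈ xs, x ∈ s) : PySem.Set.update s xs = s := by
  rw [PySem.Set.update_eq_append_filter]
  have hnil : (PySem.Set.ofList xs).filter (fun y => !s.contains y) = [] := by
    rw [List.filter_eq_nil_iff]
    intro y hy
    simp
    exact h y ((PySem.Set.mem_ofList xs y).mp hy)
  rw [hnil, List.append_nil]

theorem pc_bumps_keys (E : List (String × String)) (d : PcOuter)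
    (h : ∀ e ∈ E, e.1 ∈ d.keys) : (pcBumps d E).keys = d.keys := by
  rw [show pcBumps d E = E.foldl (fun d x => d.insert (Prod.fst x)
        ((fun (d : PcOuter) (p : String × String) =>
          ((d.getD p.1 PySem.Dict.empty).insert p.2
            ((d.getD p.1 PySem.Dict.empty).getD p.2 0 + 1))) d x)) d from rfl,
      PySem.Dict.keys_foldl_insert_key]
  apply pc_set_update_self
  intro x hx
  obtain ⟨e, he, rfl⟩ := List.mem_map.mp hx
  exact h e he

theorem pc_bumps_nodup (E : List (String × String)) (d : PcOuter)
    (h : d.keys.Nodup) : (pcBumps d E).keys.Nodup := by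
  rw [show pcBumps d E = E.foldl (fun d x => d.insert (Prod.fst x)
        ((fun (d : PcOuter) (p : String × String) =>
          ((d.getD p.1 PySem.Dict.empty).insert p.2
            ((d.getD p.1 PySem.Dict.empty).getD p.2 0 + 1))) d x)) d from rfl]
  exact PySem.Dict.nodup_keys_foldl_insert_key _ _ _ _ h

theorem pc_asm_keys (L : List ((String × String) × Int)) (d : PcOuter)
    (h : ∀ q ∈ L, q.1.1 ∈ d.keys) :
    (L.foldl (fun (res : PcOuter) q =>
      res.insert q.1.1 ((res.getD q.1.1 PySem.Dict.empty).insert q.1.2 q.2)) d).keys = d.keys := by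
  rw [show L.foldl (fun (res : PcOuter) q =>
        res.insert q.1.1 ((res.getD q.1.1 PySem.Dict.empty).insert q.1.2 q.2)) d
      = L.foldl (fun res x => res.insert ((fun (q : (String × String) × Int) => q.1.1) x)
        ((fun (res : PcOuter) (q : (String × String) × Int) =>
          ((res.getD q.1.1 PySem.Dict.empty).insert q.1.2 q.2)) res x)) d from rfl,
      PySem.Dict.keys_foldl_insert_key]
  apply pc_set_update_self
  intro x hx
  obtain ⟨q, hq, rfl⟩ := List.mem_map.mp hx
  exact h q hq

theorem pc_asm_nodup (L : List ((String × String) × Int)) (d : PcOuter)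
    (h : d.keys.Nodup) :
    (L.foldl (fun (res : PcOuter) q =>
      res.insert q.1.1 ((res.getD q.1.1 PySem.Dict.empty).insert q.1.2 q.2)) d).keys.Nodup := by
  rw [show L.foldl (fun (res : PcOuter) q =>
        res.insert q.1.1 ((res.getD q.1.1 PySem.Dict.empty).insert q.1.2 q.2)) d
      = L.foldl (fun res x => res.insert ((fun (q : (String × String) × Int) => q.1.1) x)
        ((fun (res : PcOuter) (q : (String × String) × Int) =>
          ((res.getD q.1.1 PySem.Dict.empty).insert q.1.2 q.2)) res x)) d from rfl]
  exact PySem.Dict.nodup_keys_foldl_insert_key _ _ _ _ h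

-- dedup (first occurrence kept) commutes with filter and with an injective map
theorem pc_ofList_filter {α : Type} [BEq α] [LawfulBEq α] (p : α → Bool) (l : List α) :
    PySem.Set.ofList (l.filter p) = (PySem.Set.ofList l).filter p := by
  induction l with
  | nil => simp
  | cons x xs ih =>
    by_cases hp : p x = true
    · rw [List.filter_cons_of_pos hp, PySem.Set.ofList_cons, PySem.Set.ofList_cons, ih]
      simp only [PySem.Set.discard]
      rw [List.filter_cons_of_pos hp, List.filter_comm]
    · rw [List.filter_cons_of_neg (by simpa using hp), PySem.Set.ofList_cons, ih]
      simp only [PySem.Set.discard]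
      rw [List.filter_cons_of_neg (by simpa using hp), List.filter_comm]
      symm
      rw [List.filter_eq_self]
      intro a ha
      have hpa : p a = true := (List.mem_filter.mp ha).2
      have : a ≠ x := fun hax => by rw [hax] at hpa; exact hp hpa
      simpa using this

theorem pc_ofList_map_inj {α β : Type} [BEq α] [LawfulBEq α] [BEq β] [LawfulBEq β]
    (f : α → β) (l : List α) (hinj : ∀ x ∈ l, ∀ y ∈ l, f x = f y → x = y) :
    PySem.Set.ofList (l.map f) = (PySem.Set.ofList l).map f := by
  induction l with
  | nil => simp
  | cons x xs ih =>
    rw [List.map_cons, PySem.Set.ofList_cons, PySem.Set.ofList_cons, List.map_cons]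
    simp only [PySem.Set.discard]
    rw [ih (fun a ha b hb hab => hinj a (List.mem_cons_of_mem x ha) b (List.mem_cons_of_mem x hb) hab),
        List.filter_map]
    congr 1
    apply congrArg
    apply List.filter_congr
    intro a ha
    have hax : a ∈ xs := (PySem.Set.mem_ofList xs a).mp ha
    by_cases h : a = x
    · simp [h]
    · have hfa : f a ≠ f x := fun hf =>
        h (hinj a (List.mem_cons_of_mem x hax) x (List.mem_cons_self) hf)
      simp [h, hfa]

-- the inner dict assembled for key a from the counter = the counter of a's projected events
theorem pc_inner_eq (E : List (String × String)) (a : String) :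
    ((PySem.Dict.counter E).items.filter (fun q => q.1.1 == a)).foldl
        (fun (inn : PcInner) q => inn.insert q.1.2 q.2) PySem.Dict.empty
      = PySem.Dict.counter ((E.filter (fun e => e.1 == a)).map Prod.snd) := by
  have hfirst : ∀ e ∈ E.filter (fun e => e.1 == a), e.1 = a := by
    intro e he
    simpa using List.of_mem_filter he
  have h1 : (PySem.Dict.counter E).items.filter (fun q => q.1.1 == a)
      = ((PySem.Set.ofList E).filter (fun e => e.1 == a)).map
          (fun e => (e, (E.count e : Int))) := by
    rw [PySem.Dict.items_counter, List.filter_map]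
    rfl
  rw [h1, ← pc_ofList_filter, List.foldl_map]
  have hinjPa : ∀ x ∈ E.filter (fun e => e.1 == a), ∀ y ∈ E.filter (fun e => e.1 == a),
      x.2 = y.2 → x = y := by
    intro x hx y hy h2
    exact Prod.ext (by rw [hfirst x hx, hfirst y hy]) h2
  have hnodup2 : ((PySem.Set.ofList (E.filter (fun e => e.1 == a))).map Prod.snd).Nodup := by
    refine List.Nodup.map_on ?_ (PySem.Set.nodup_ofList _)
    intro x hx y hy hxy
    exact hinjPa x ((PySem.Set.mem_ofList _ x).mp hx) y ((PySem.Set.mem_ofList _ y).mp hy) hxy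
  apply PySem.Dict.ext
  rw [PySem.Dict.items_foldl_insert_fresh (PySem.Set.ofList (E.filter (fun e => e.1 == a)))
        Prod.snd (fun e => (E.count e : Int)) PySem.Dict.empty (fun e _ => by simp) hnodup2]
  rw [PySem.Dict.items_counter,
      pc_ofList_map_inj Prod.snd (E.filter (fun e => e.1 == a)) hinjPa, List.map_map]
  rw [show ((PySem.Dict.empty : PcInner).items) = [] from rfl, List.nil_append]
  apply List.map_congr_left
  intro e he
  have hePa : e ∈ E.filter (fun e => e.1 == a) := (PySem.Set.mem_ofList _ e).mp he
  have hcount : E.count e = ((E.filter (fun e => e.1 == a)).map Prod.snd).count e.2 := by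
    rw [← List.count_filter (p := fun x => x.1 == a) (by simp [hfirst e hePa])]
    rw [List.count_eq_countP, List.count_eq_countP, List.countP_map]
    apply List.countP_congr
    intro x hx
    constructor
    · intro hxe
      have : x = e := by simpa using hxe
      simp [this]
    · intro hxe
      have hx2 : x.2 = e.2 := by simpa using hxe
      have : x = e := Prod.ext (by rw [hfirst x hx, hfirst e hePa]) hx2
      simp [this]
  simp only [Function.comp]
  rw [hcount]

theorem pc_asm_eq_bumps (E : List (String × String)) (d : PcOuter)
    (hk : ∀ e ∈ E, e.1 ∈ d.keys) (hnd : d.keys.Nodup) (hempty : pcAllEmpty d) :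
    (PySem.Dict.counter E).items.foldl
        (fun (res : PcOuter) q => res.insert q.1.1
          ((res.getD q.1.1 PySem.Dict.empty).insert q.1.2 q.2)) d
      = pcBumps d E := by
  have hkL : ∀ q ∈ (PySem.Dict.counter E).items, q.1.1 ∈ d.keys := by
    intro q hq
    have h1 : q.1 ∈ (PySem.Dict.counter E).keys := PySem.Dict.mem_keys_of_mem_items _ hq
    rw [PySem.Dict.keys_counter] at h1
    exact hk q.1 ((PySem.Set.mem_ofList E q.1).mp h1)
  apply PySem.Dict.ext
  rw [PySem.Dict.items_eq_map_keys _ (pc_asm_nodup _ _ hnd) PySem.Dict.empty,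
      PySem.Dict.items_eq_map_keys _ (pc_bumps_nodup _ _ hnd) PySem.Dict.empty,
      pc_asm_keys _ _ hkL, pc_bumps_keys _ _ hk]
  apply List.map_congr_left
  intro a _
  apply congrArg (Prod.mk a)
  rw [pc_asm_getD, pc_bumps_getD, pc_getD_empty d hempty a, pc_inner_eq,
      PySem.Dict.foldl_insert_getD_add_one_eq_counter]

-- ---------- membership facts used to discharge the key-presence hypotheses ----------

theorem pc_adjA_mem (l : List Char) : ∀ p ∈ pcAdjA l,
    (PySem.Chars.isalpha p.1 = true ∧ p.1 ∈ l) ∧ (PySem.Chars.isalpha p.2 = true ∧ p.2 ∈ l) := by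
  induction l with
  | nil => intro p hp; cases hp
  | cons a l ih =>
    cases l with
    | nil => intro p hp; cases hp
    | cons b rest =>
      intro p hp
      rw [show pcAdjA (a :: b :: rest) = (if PySem.Chars.isalpha a && PySem.Chars.isalpha b
            then [(a, b)] else []) ++ pcAdjA (b :: rest) from rfl] at hp
      rcases List.mem_append.mp hp with h1 | h1
      · by_cases hab : (PySem.Chars.isalpha a && PySem.Chars.isalpha b) = true
        · rw [if_pos hab] at h1
          rw [Bool.and_eq_true] at hab
          have hpab : p = (a, b) := by simpa using h1
          rw [hpab]
          exact ⟨⟨hab.1, by simp⟩, ⟨hab.2, by simp⟩⟩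
        · rw [if_neg hab] at h1; cases h1
      · have := ih p h1
        exact ⟨⟨this.1.1, List.mem_cons_of_mem a this.1.2⟩,
               ⟨this.2.1, List.mem_cons_of_mem a this.2.2⟩⟩

theorem pc_dir_key_mem (l : List Char) :
    ∀ e ∈ pcDir (pcAdjA l), e.1 ∈ (pcCres PySem.Dict.empty (pcCL l)).keys := by
  intro e he
  obtain ⟨p, hp, hep⟩ := List.mem_flatMap.mp he
  have hmem := pc_adjA_mem l p hp
  have hcl : e.1 ∈ pcCL l := by
    have hdp : e = (pcKey p.1, pcKey p.2) ∨ e = (pcKey p.2, pcKey p.1) := by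
      simpa [pcDirP] using hep
    have : e.1 = pcKey p.1 ∨ e.1 = pcKey p.2 := by
      rcases hdp with h | h
      · left; rw [h]
      · right; rw [h]
    rcases this with h | h <;> rw [h] <;> refine List.mem_flatMap.mpr ?_
    · exact ⟨p.1, hmem.1.2, by simp [hmem.1.1]⟩
    · exact ⟨p.2, hmem.2.2, by simp [hmem.2.1]⟩
  rw [← PySem.Dict.contains_iff_mem_keys]
  exact pc_cres_contains_of_mem _ _ _ hcl

-- B's stage-1 loop in port shape
theorem pc_B_runs (l : List Char) :
    (if (l.foldl pcStep (([], []) : List (List Char) × List Char)).2 = []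
     then (l.foldl pcStep (([], []) : List (List Char) × List Char)).1
     else (l.foldl pcStep (([], []) : List (List Char) × List Char)).1
          ++ [(l.foldl pcStep (([], []) : List (List Char) × List Char)).2])
    = pcRunsAux [] l := by
  have h := pc_runs_fold l [] []
  simpa [pcFlush] using h

theorem pc_flat_pairs (l : List Char) :
    (pcRunsAux [] l).flatMap pcPairs = pcAdjA l := by
  rw [pc_runs_pairs l []]
  cases l <;> simp [pcPairs, pcBridge]

-- ===== VERDICT (by name: the statement is the Claim_ definition above) =====
theorem proximity_count_spec : Claim_equal_proximity_count := by
  intro text _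
  show proximity_count text = proximity_count_alt text
  have habs : (List.range (PySem.Chars.upper text.toList).length).foldl
        (fun d i => pcBumps (pcCres d (pcC (PySem.Chars.upper text.toList) i))
          (pcLR (PySem.Chars.upper text.toList) i)) PySem.Dict.empty
      = pcBumps (pcCres PySem.Dict.empty (pcCL (PySem.Chars.upper text.toList)))
          (pcDir (pcAdjA (PySem.Chars.upper text.toList))) := by
    rw [pc_phases]
    simp only [pcCres, pcBumps]
    rw [pc_foldl_foldl pcCre (pcC _), pc_creates_eq,
        pc_foldl_foldl (fun d (p : String × String) => pcBump d p.1 p.2) (pcLR _),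
        pc_ops_eq, pc_E_eq_dir]
  unfold proximity_count_alt
  simp only [PySem.List.slice_from_one]
  rw [show (fun (st : List (List Char) × List Char) (c : Char) =>
        if PySem.Chars.isalpha c then (st.1, st.2 ++ [c])
        else if st.2 = [] then (st.1, ([] : List Char)) else (st.1 ++ [st.2], [])) = pcStep
      from rfl]
  rw [pc_B_runs (PySem.Chars.upper text.toList)]
  rw [pc_tally_eq (pcRunsAux [] (PySem.Chars.upper text.toList)),
      pc_flat_pairs (PySem.Chars.upper text.toList),
      pc_res0_eq (PySem.Chars.upper text.toList)]
  rw [pc_asm_eq_bumps (pcDir (pcAdjA (PySem.Chars.upper text.toList)))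
        (pcCres PySem.Dict.empty (pcCL (PySem.Chars.upper text.toList)))
        (pc_dir_key_mem (PySem.Chars.upper text.toList))
        (pc_cres_nodup _ _ PySem.Dict.nodup_keys_empty)
        (pc_allEmpty_cres _ _ pc_allEmpty_empty)]
  exact congrArg (fun d : PcOuter => d.items.map (fun p => (p.1, p.2.items)))
    ((pc_foldA_eq (PySem.Chars.upper text.toList)).trans habs)
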